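-- pv_equiv track=rewrite | github.com/XCreeperPa/pmsm | pmsm/log_manager.py | _convert_search_pattern
-- ===== SOURCE A (Python) =====
-- def _convert_search_pattern(pattern):
--     """转换搜索模式为SQL LIKE模式"""
--     if not pattern:
--         return None
--     # 替换未转义的 * 为 %，保留转义的 \*
--     i = 0
--     result = ''
--     while i < len(pattern):
--         if pattern[i:i+2] == '\\*':
--             result += '*'
--             i += 2
--         elif pattern[i] == '*':
--             result += '%'
--             i += 1
--         else:
--             result += pattern[i]
--             i += 1
--     return f'%{result}%'  # 在两端添加通配符以支持部分匹配
-- ===== SOURCE B (Python) =====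
-- def _convert_search_pattern(pattern):
--     """转换搜索模式为SQL LIKE模式"""
--     if not pattern:
--         return None
--     # Segments between literal '\*' tokens contain no escaped stars, so every
--     # remaining '*' in them is unescaped and becomes '%'; the tokens themselves
--     # come back as literal '*' via the join.
--     converted = '*'.join(seg.replace('*', '%') for seg in pattern.split('\\*'))
--     return f'%{converted}%'
-- ===== Notes on version B (the rewrite author's own statement) =====
-- stated objective: faster
-- what changed: Replaced the index-based while loop with two-character lookahead and repeated string concatenation by a split on the literal escape token '\*', a per-segment replace('*','%'), and a rejoin with '*'.
import Mathlib
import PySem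

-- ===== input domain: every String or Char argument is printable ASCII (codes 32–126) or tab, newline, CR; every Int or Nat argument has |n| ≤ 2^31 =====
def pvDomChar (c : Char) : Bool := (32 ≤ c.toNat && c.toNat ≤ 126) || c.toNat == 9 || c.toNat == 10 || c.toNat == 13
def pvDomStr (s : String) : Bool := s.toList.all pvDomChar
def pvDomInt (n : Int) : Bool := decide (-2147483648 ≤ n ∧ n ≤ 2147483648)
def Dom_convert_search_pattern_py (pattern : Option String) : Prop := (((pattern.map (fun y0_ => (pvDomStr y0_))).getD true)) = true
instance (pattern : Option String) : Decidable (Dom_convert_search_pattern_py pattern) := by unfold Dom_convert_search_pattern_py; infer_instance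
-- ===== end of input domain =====

-- B replaces A's index-based lookahead while loop (which accumulates via repeated string +=)
-- by a split-on-'\*' / per-segment replace('*','%') / rejoin-with-'*' pipeline; the timing
-- run measured B faster.

-- ===== PORT A =====
-- A's while loop: scan the characters, two-char lookahead for '\*', accumulating `result`.
def convertLoop : List Char → List Char → List Char
  | acc, [] => acc
  | acc, c :: rest =>
    if c = '\\' ∧ rest.head? = some '*' then
      convertLoop (acc ++ ['*']) rest.tail          -- pattern[i:i+2] == '\*'
    else if c = '*' then
      convertLoop (acc ++ ['%']) rest
    else
      convertLoop (acc ++ [c]) rest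
termination_by _ l => l.length
decreasing_by all_goals simp [List.length_tail]

def convert_search_pattern_py (pattern : Option String) : Option String :=
  match pattern with
  | none => none
  | some s =>
    if s.toList = [] then none                       -- `if not pattern`
    else some (String.ofList ('%' :: convertLoop [] s.toList ++ ['%']))

-- ===== PORT B =====
def convert_search_pattern_py_alt (pattern : Option String) : Option String :=
  match pattern with
  | none => none
  | some s =>
    if s.toList = [] then none                       -- `if not pattern`
    else
      some (String.ofList ('%' ::
        PySem.Chars.join ['*']
          ((PySem.Chars.splitOn s.toList ['\\', '*']).map
            (fun seg => PySem.Chars.replace seg ['*'] ['%'])) ++ ['%']))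

-- ===== PRECONDITION & SPEC =====
def Spec_convert_search_pattern_py (pattern : Option String) (out : Option String) : Prop := out = convert_search_pattern_py_alt pattern
instance (pattern : Option String) (out : Option String) : Decidable (Spec_convert_search_pattern_py pattern out) := by unfold Spec_convert_search_pattern_py; infer_instance

-- ===== CLAIM (what is proved, stated in full; the proofs are below) =====
def Claim_equal_convert_search_pattern_py : Prop := ∀ (pattern : Option String), Dom_convert_search_pattern_py pattern → Spec_convert_search_pattern_py pattern (convert_search_pattern_py pattern)

-- ===== LEMMAS AND PROOFS =====

-- unescaped-star substitution on a single character
def starRep (c : Char) : Char := if c = '*' then '%' else c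

-- reference (structural) split on the two-character token '\*'
def spl : List Char → List (List Char)
  | [] => [[]]
  | [c] => [[c]]
  | c :: d :: r =>
    if c = '\\' ∧ d = '*' then [] :: spl r
    else (c :: (spl (d :: r)).headI) :: (spl (d :: r)).tail

lemma spl_ne_nil (l : List Char) : spl l ≠ [] := by
  match l with
  | [] => simp [spl]
  | [c] => simp [spl]
  | c :: d :: r => simp only [spl]; split <;> simp

-- PySem.Chars.replace with old = ['*'], new = ['%'] is charwise starRep
lemma replace_go_star : ∀ (fuel : Nat) (l acc : List Char), l.length ≤ fuel →
    PySem.Chars.replace.go ['*'] ['%'] fuel l acc = acc.reverse ++ l.map starRep := by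
  intro fuel
  induction fuel with
  | zero =>
    intro l acc h
    have : l = [] := by cases l <;> simp_all
    subst this; simp [PySem.Chars.replace.go]
  | succ f ih =>
    intro l acc h
    cases l with
    | nil => simp [PySem.Chars.replace.go]
    | cons c t =>
      have hle : t.length ≤ f := by simp only [List.length_cons] at h; omega
      by_cases hc : c = '*'
      · subst hc
        rw [PySem.Chars.replace.go]
        simp only [List.isPrefixOf, BEq.rfl, Bool.true_and, if_pos]
        rw [show List.drop (['*'] : List Char).length ('*' :: t) = t from rfl,
            show (['%'] : List Char).reverse ++ acc = '%' :: acc from rfl,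
            ih t ('%' :: acc) hle]
        simp [starRep]
      · rw [PySem.Chars.replace.go]
        have hpf : ((['*'] : List Char).isPrefixOf (c :: t)) = false := by
          simp [List.isPrefixOf]; intro h'; exact absurd h'.symm hc
        simp only [hpf, Bool.false_eq_true, if_neg, not_false_iff]
        rw [ih t (c :: acc) hle]
        simp [starRep, hc]

lemma replace_star (seg : List Char) :
    PySem.Chars.replace seg ['*'] ['%'] = seg.map starRep := by
  have := replace_go_star seg.length seg [] le_rfl
  simpa [PySem.Chars.replace] using this

-- PySem.Chars.splitOn.go with sep = ['\\','*'] computes the reference split `spl`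
lemma splitOn_go_tok : ∀ (fuel : Nat) (l cur : List Char) (acc : List (List Char)),
    l.length ≤ fuel →
    PySem.Chars.splitOn.go ['\\', '*'] fuel l cur acc
      = acc.reverse ++ (cur.reverse ++ (spl l).headI) :: (spl l).tail := by
  intro fuel
  induction fuel with
  | zero =>
    intro l cur acc h
    have : l = [] := by cases l <;> simp_all
    subst this; simp [PySem.Chars.splitOn.go, spl]
  | succ f ih =>
    intro l cur acc h
    match l with
    | [] => simp [PySem.Chars.splitOn.go, spl]
    | [c] =>
      rw [PySem.Chars.splitOn.go]
      have hpf : ((['\\', '*'] : List Char).isPrefixOf [c]) = false := by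
        simp [List.isPrefixOf]
      simp only [hpf, Bool.false_eq_true, if_neg, not_false_iff]
      rw [ih [] (c :: cur) acc (by simp)]
      simp [spl]
    | c :: d :: t =>
      have hle : t.length ≤ f := by simp only [List.length_cons] at h; omega
      rw [PySem.Chars.splitOn.go]
      by_cases hcd : c = '\\' ∧ d = '*'
      · obtain ⟨rfl, rfl⟩ := hcd
        simp only [List.isPrefixOf, BEq.rfl, Bool.true_and, if_pos]
        rw [show List.drop (['\\', '*'] : List Char).length ('\\' :: '*' :: t) = t from rfl,
            ih t [] (List.reverse cur :: acc) hle]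
        rcases hspl : spl t with _ | ⟨h0, ts⟩
        · exact absurd hspl (spl_ne_nil t)
        · simp [spl, hspl]
      · have hpf : ((['\\', '*'] : List Char).isPrefixOf (c :: d :: t)) = false := by
          simp [List.isPrefixOf]
          intro h1 h2
          exact absurd ⟨h1.symm, h2.symm⟩ hcd
        simp only [hpf, Bool.false_eq_true, if_neg, not_false_iff]
        have hle2 : (d :: t).length ≤ f := by simp only [List.length_cons] at h ⊢; omega
        rw [ih (d :: t) (c :: cur) acc hle2]
        rcases hspl : spl (d :: t) with _ | ⟨h0, ts⟩
        · exact absurd hspl (spl_ne_nil _)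
        · simp only [spl, if_neg hcd, hspl]
          simp

lemma splitOn_tok (l : List Char) : PySem.Chars.splitOn l ['\\', '*'] = spl l := by
  have h := splitOn_go_tok (l.length + 1) l [] [] (by omega)
  rcases hspl : spl l with _ | ⟨h0, ts⟩
  · exact absurd hspl (spl_ne_nil l)
  · simpa [PySem.Chars.splitOn, hspl] using h

-- joining with '*' commutes with pulling the head character out of the first piece
lemma join_cons_head (x : Char) (xs : List Char) (rest : List (List Char)) :
    PySem.Chars.join ['*'] ((x :: xs) :: rest) = x :: PySem.Chars.join ['*'] (xs :: rest) := by
  cases rest with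
  | nil => simp [PySem.Chars.join, List.intercalate]
  | cons b l => rw [PySem.Chars.join_cons_cons, PySem.Chars.join_cons_cons]; simp

-- one step of B's pipeline on a non-token head character
lemma join_spl_cons (c : Char) (rest : List Char)
    (h : ¬(c = '\\' ∧ rest.head? = some '*')) :
    PySem.Chars.join ['*'] ((spl (c :: rest)).map (List.map starRep))
      = starRep c :: PySem.Chars.join ['*'] ((spl rest).map (List.map starRep)) := by
  cases rest with
  | nil => simp [spl, PySem.Chars.join, List.intercalate]
  | cons d r =>
    have hcd : ¬(c = '\\' ∧ d = '*') := by
      rintro ⟨rfl, rfl⟩; exact h ⟨rfl, rfl⟩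
    rcases hspl : spl (d :: r) with _ | ⟨h0, ts⟩
    · exact absurd hspl (spl_ne_nil _)
    · simp only [spl, if_neg hcd, hspl, List.headI, List.tail_cons, List.map]
      rw [join_cons_head]

-- A's loop equals B's split/replace/join pipeline (spl form), for any accumulator
lemma convertLoop_eq (acc l : List Char) :
    convertLoop acc l = acc ++ PySem.Chars.join ['*'] ((spl l).map (List.map starRep)) := by
  induction acc, l using convertLoop.induct with
  | case1 acc => simp [convertLoop, spl, PySem.Chars.join, List.intercalate]
  | case2 acc c rest h ih =>
    obtain ⟨rfl, hh⟩ := h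
    cases rest with
    | nil => simp at hh
    | cons d r =>
      simp only [List.head?_cons, Option.some.injEq] at hh
      subst hh
      rw [convertLoop, if_pos ⟨rfl, rfl⟩]
      simp only [List.tail_cons] at ih ⊢
      rw [ih]
      have hsp : spl ('\\' :: '*' :: r) = [] :: spl r := by simp [spl]
      rcases hspl : spl r with _ | ⟨h0, ts⟩
      · exact absurd hspl (spl_ne_nil r)
      · rw [hsp, hspl]
        simp only [List.map]
        rw [PySem.Chars.join_cons_cons]
        simp
  | case3 acc rest h ih =>
    rw [convertLoop, if_neg h, if_pos rfl]
    rw [ih, join_spl_cons '*' rest h]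
    simp [starRep]
  | case4 acc c rest h hc ih =>
    rw [convertLoop, if_neg h, if_neg hc]
    rw [ih, join_spl_cons c rest h]
    simp [starRep, hc]

-- ===== VERDICT (by name: the statement is the Claim_ definition above) =====
theorem convert_search_pattern_py_spec : Claim_equal_convert_search_pattern_py := by
  intro pattern _
  unfold Spec_convert_search_pattern_py convert_search_pattern_py convert_search_pattern_py_alt
  cases pattern with
  | none => rfl
  | some s =>
    by_cases hnil : s.toList = []
    · simp [hnil]
    · simp only [hnil, if_neg, not_false_iff]
      have hmap : (PySem.Chars.splitOn s.toList ['\\', '*']).map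
            (fun seg => PySem.Chars.replace seg ['*'] ['%'])
          = (spl s.toList).map (List.map starRep) := by
        rw [splitOn_tok]
        exact List.map_congr_left (fun seg _ => replace_star seg)
      rw [hmap, convertLoop_eq [] s.toList]
      simp
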